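-- pv_equiv track=rewrite | github.com/geokoko/ece_ntua_algorithms | aoc/day8a.py | build_new_grid
-- ===== SOURCE A (Python) =====
-- def build_new_grid(grid, anti_nodes):
--     new_grid = []
--     for row_idx, row in enumerate(grid):
--         new_row = []
--         for col_idx, char in enumerate(row):
--             if (row_idx, col_idx) in anti_nodes:
--                 new_row.append("#")
--             elif grid[row_idx][col_idx] != ".":
--                 new_row.append(grid[row_idx][col_idx])
--             else:
--                 new_row.append(".")
--         new_grid.append("".join(new_row))
--
--     return new_grid
-- ===== SOURCE B (Python) =====
-- def build_new_grid(grid, anti_nodes):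
--     result = [list(row) for row in grid]
--     for r, c in anti_nodes:
--         if 0 <= r < len(result) and 0 <= c < len(result[r]):
--             result[r][c] = "#"
--     return ["".join(row) for row in result]
-- ===== Notes on version B (the rewrite author's own statement) =====
-- stated objective: alternative
-- what changed: A scans every cell and does a membership test of (row,col) in anti_nodes per cell; B copies the grid once into char lists and scatter-writes '#' at each in-bounds anti-node, so the per-cell scan of anti_nodes disappears.
import Mathlib
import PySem

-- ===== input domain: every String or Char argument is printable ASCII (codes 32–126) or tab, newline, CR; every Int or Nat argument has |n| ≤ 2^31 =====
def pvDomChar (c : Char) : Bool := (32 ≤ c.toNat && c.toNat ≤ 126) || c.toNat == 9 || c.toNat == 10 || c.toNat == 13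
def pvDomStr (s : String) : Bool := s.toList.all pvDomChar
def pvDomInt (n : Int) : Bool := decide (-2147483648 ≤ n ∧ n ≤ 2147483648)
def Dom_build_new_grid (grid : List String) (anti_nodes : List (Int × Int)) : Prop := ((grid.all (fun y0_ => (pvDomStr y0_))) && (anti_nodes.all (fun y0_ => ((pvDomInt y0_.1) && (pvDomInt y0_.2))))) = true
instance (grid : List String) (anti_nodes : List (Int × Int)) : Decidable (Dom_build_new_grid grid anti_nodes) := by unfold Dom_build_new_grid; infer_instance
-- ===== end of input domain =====

-- B replaces A's per-cell membership scan of anti_nodes by one bulk copy of the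
-- grid plus a sparse scatter-write of '#' at each in-bounds anti-node.

-- ===== PORT A =====
-- literal port of A: for each (row_idx, row), for each (col_idx, char):
-- '#' if (row_idx, col_idx) in anti_nodes, else the char if it is not '.', else '.'
def build_new_grid (grid : List String) (anti_nodes : List (Int × Int)) : List String :=
  (PySem.List.enumerate grid).map (fun ir =>
    String.mk ((PySem.List.enumerate ir.2.toList).map (fun jc =>
      if (ir.1, jc.1) ∈ anti_nodes then '#'
      else if jc.2 ≠ '.' then jc.2
      else '.')))

-- ===== PORT B =====
-- one scatter write: result[r][c] = '#' when 0 ≤ r < len(result) and 0 ≤ c < len(result[r])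
def bngWrite (g : List (List Char)) (rc : Int × Int) : List (List Char) :=
  if 0 ≤ rc.1 ∧ rc.1 < (g.length : Int) ∧ 0 ≤ rc.2 ∧ rc.2 < ((g.getD rc.1.toNat []).length : Int) then
    g.set rc.1.toNat ((g.getD rc.1.toNat []).set rc.2.toNat '#')
  else g

def build_new_grid_alt (grid : List String) (anti_nodes : List (Int × Int)) : List String :=
  (anti_nodes.foldl bngWrite (grid.map String.toList)).map (fun row => String.mk row)

-- ===== PRECONDITION & SPEC =====
def Spec_build_new_grid (grid : List String) (anti_nodes : List (Int × Int)) (out : List String) : Prop := out = build_new_grid_alt grid anti_nodes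
instance (grid : List String) (anti_nodes : List (Int × Int)) (out : List String) : Decidable (Spec_build_new_grid grid anti_nodes out) := by unfold Spec_build_new_grid; infer_instance

-- ===== CLAIM (what is proved, stated in full; the proofs are below) =====
def Claim_equal_build_new_grid : Prop := ∀ (grid : List String) (anti_nodes : List (Int × Int)), Dom_build_new_grid grid anti_nodes → Spec_build_new_grid grid anti_nodes (build_new_grid grid anti_nodes)

-- ===== LEMMAS AND PROOFS =====

lemma bngWrite_length (g : List (List Char)) (p : Int × Int) :
    (bngWrite g p).length = g.length := by
  unfold bngWrite; split_ifs <;> simp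

lemma bngWrite_getD_length (g : List (List Char)) (p : Int × Int) (i : Nat) :
    ((bngWrite g p).getD i []).length = (g.getD i []).length := by
  unfold bngWrite
  split_ifs with h
  · simp only [List.getD_eq_getElem?_getD, List.getElem?_set]
    by_cases hi : p.1.toNat = i
    · subst hi
      have hl : p.1.toNat < g.length := by omega
      simp [hl, List.getElem?_eq_getElem hl, List.getD_eq_getElem?_getD]
    · simp [hi]
  · rfl

-- value of a cell after one scatter write
lemma bngWrite_get2 (g : List (List Char)) (p : Int × Int) (i j : Nat)
    (hi : i < g.length) (hj : j < (g.getD i []).length) :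
    ((bngWrite g p).getD i []).getD j ' ' =
      if p = ((i : Int), (j : Int)) then '#' else (g.getD i []).getD j ' ' := by
  unfold bngWrite
  split_ifs with h hp hp2
  · -- write happens and p = (i, j)
    obtain ⟨h1, h2, h3, h4⟩ := h
    have hpi : p.1.toNat = i := by rw [hp]; simp
    have hpj : p.2.toNat = j := by rw [hp]; simp
    subst hpi; subst hpj
    have hl : p.1.toNat < g.length := by omega
    have hjl : p.2.toNat < (g.getD p.1.toNat []).length := by omega
    rw [List.getD_eq_getElem _ _ hl] at hjl
    simp [List.getD_eq_getElem?_getD, List.getElem?_set, hl, hjl]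
  · -- write happens elsewhere
    obtain ⟨h1, h2, h3, h4⟩ := h
    simp only [List.getD_eq_getElem?_getD, List.getElem?_set]
    by_cases hri : p.1.toNat = i
    · have hcj : p.2.toNat ≠ j := by
        intro hcj
        exact hp (by rw [Prod.ext_iff]; constructor <;> omega)
      have hl : p.1.toNat < g.length := by omega
      simp [hri, hri ▸ hl, List.getElem?_set, hcj]
    · simp [hri]
  · -- no write although p = (i, j): impossible, (i, j) is in bounds
    exfalso
    apply h
    rw [hp2]
    have hj' : j < (g[i]'hi).length := by rw [← List.getD_eq_getElem _ _ hi]; exact hj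
    refine ⟨?_, ?_, ?_, ?_⟩ <;> simp [hi, hj']
  · rfl

lemma foldl_bngWrite_length (ns : List (Int × Int)) (g : List (List Char)) :
    (ns.foldl bngWrite g).length = g.length := by
  induction ns generalizing g with
  | nil => rfl
  | cons p ns ih => simp [List.foldl_cons, ih, bngWrite_length]

lemma foldl_bngWrite_getD_length (ns : List (Int × Int)) (g : List (List Char)) (i : Nat) :
    ((ns.foldl bngWrite g).getD i []).length = (g.getD i []).length := by
  induction ns generalizing g with
  | nil => rfl
  | cons p ns ih => rw [List.foldl_cons, ih, bngWrite_getD_length]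

-- the scatter loop, characterised pointwise
lemma foldl_bngWrite_get2 (ns : List (Int × Int)) (g : List (List Char)) (i j : Nat)
    (hi : i < g.length) (hj : j < (g.getD i []).length) :
    ((ns.foldl bngWrite g).getD i []).getD j ' ' =
      if ((i : Int), (j : Int)) ∈ ns then '#' else (g.getD i []).getD j ' ' := by
  induction ns generalizing g with
  | nil => simp
  | cons p ns ih =>
    rw [List.foldl_cons]
    have hi' : i < (bngWrite g p).length := by rw [bngWrite_length]; exact hi
    have hj' : j < ((bngWrite g p).getD i []).length := by rw [bngWrite_getD_length]; exact hj
    rw [ih (bngWrite g p) hi' hj', bngWrite_get2 g p i j hi hj]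
    by_cases hm : ((i : Int), (j : Int)) ∈ ns
    · simp [hm]
    · by_cases hp : p = ((i : Int), (j : Int))
      · simp [hm, hp, List.mem_cons]
      · have : ((i : Int), (j : Int)) ≠ p := fun h => hp h.symm
        simp [hm, hp, List.mem_cons, this]

-- ===== VERDICT (by name: the statement is the Claim_ definition above) =====
theorem build_new_grid_spec : Claim_equal_build_new_grid := by
  intro grid anti_nodes _
  unfold Spec_build_new_grid build_new_grid build_new_grid_alt
  have hGlen : (grid.map String.toList).length = grid.length := by simp
  apply List.ext_getElem
  · simp [foldl_bngWrite_length, PySem.List.length_enumerate]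
  · intro i h1 h2
    have hiG : i < (grid.map String.toList).length := by
      simpa [foldl_bngWrite_length] using h2
    have higrid : i < grid.length := by simpa using hiG
    have hGi : (grid.map String.toList).getD i [] = (grid[i]'higrid).toList := by
      rw [List.getD_eq_getElem _ _ hiG]; simp
    have hF : i < (anti_nodes.foldl bngWrite (grid.map String.toList)).length := by
      simpa [foldl_bngWrite_length] using hiG
    have hFi : (anti_nodes.foldl bngWrite (grid.map String.toList))[i]'hF
        = (anti_nodes.foldl bngWrite (grid.map String.toList)).getD i [] :=
      (List.getD_eq_getElem _ _ hF).symm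
    simp only [List.getElem_map, PySem.List.getElem_enumerate]
    congr 1
    apply List.ext_getElem
    · simp only [List.length_map, PySem.List.length_enumerate, hFi,
        foldl_bngWrite_getD_length, hGi]
    · intro j hj1 hj2
      have hjG : j < ((grid.map String.toList).getD i []).length := by
        rw [hGi]; simpa [PySem.List.length_enumerate] using hj1
      have key := foldl_bngWrite_get2 anti_nodes (grid.map String.toList) i j hiG hjG
      have hjF : j < ((anti_nodes.foldl bngWrite (grid.map String.toList))[i]'hF).length := by
        rw [← List.getD_eq_getElem _ _ hF, foldl_bngWrite_getD_length]
        exact hjG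
      have hval : ((anti_nodes.foldl bngWrite (grid.map String.toList)).getD i []).getD j ' '
          = ((anti_nodes.foldl bngWrite (grid.map String.toList))[i]'hF)[j]'hjF := by
        rw [List.getD_eq_getElem _ _ hF, List.getD_eq_getElem _ _ hjF]
      rw [show ((anti_nodes.foldl bngWrite (grid.map String.toList))[i]'hF)[j]'hjF
            = if ((i : Int), (j : Int)) ∈ anti_nodes then '#'
              else ((grid.map String.toList).getD i []).getD j ' ' from hval ▸ key, hGi]
      have hjc : j < (grid[i]'higrid).toList.length := by
        simpa [PySem.List.length_enumerate] using hj1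
      rw [List.getD_eq_getElem _ _ hjc]
      simp only [List.getElem_map, PySem.List.getElem_enumerate, zero_add]
      by_cases hm : ((i : Int), (j : Int)) ∈ anti_nodes
      · simp [hm]
      · by_cases hc : (grid[i]'higrid).toList[j]'hjc = '.' <;> simp [hm, hc]
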